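-- pv_equiv track=rewrite | github.com/avidyakov/algo | sprint4/g.py | get_gap_len
-- ===== SOURCE A (Python) =====
-- from itertools import accumulate
--
-- def get_gap_len(results: list) -> int:
--     """
--     >>> get_gap_len([-1, 1])
--     2
--     >>> get_gap_len([-1, 1, -1])
--     2
--     >>> get_gap_len([-1, -1, 1, -1, -1, -1, 1, -1, -1, 1])
--     4
--     """
--     max_ = pointer = 0
--
--     while pointer != len(results) and max_ < len(results):
--         try:
--             idx = len(results[pointer:]) - tuple(accumulate(results[pointer:]))[::-1].index(0)
--             if idx > max_:
--                 max_ = idx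
--         except ValueError:
--             pass
--
--         pointer += 1
--
--     return max_
-- ===== SOURCE B (Python) =====
-- def get_gap_len(results: list) -> int:
--     best = 0
--     first = {0: 0}  # prefix sum value -> index of its first occurrence
--     s = 0
--     for i, x in enumerate(results, 1):
--         s += x
--         j = first.get(s)
--         if j is None:
--             first[s] = i
--         elif i - j > best:
--             best = i - j
--     return best
-- ===== Notes on version B (the rewrite author's own statement) =====
-- stated objective: faster
-- what changed: Replaces the per-start suffix accumulate + reversed index scan (quadratic) by a single pass over prefix sums with a dict of each sum's first occurrence.
import Mathlib
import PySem

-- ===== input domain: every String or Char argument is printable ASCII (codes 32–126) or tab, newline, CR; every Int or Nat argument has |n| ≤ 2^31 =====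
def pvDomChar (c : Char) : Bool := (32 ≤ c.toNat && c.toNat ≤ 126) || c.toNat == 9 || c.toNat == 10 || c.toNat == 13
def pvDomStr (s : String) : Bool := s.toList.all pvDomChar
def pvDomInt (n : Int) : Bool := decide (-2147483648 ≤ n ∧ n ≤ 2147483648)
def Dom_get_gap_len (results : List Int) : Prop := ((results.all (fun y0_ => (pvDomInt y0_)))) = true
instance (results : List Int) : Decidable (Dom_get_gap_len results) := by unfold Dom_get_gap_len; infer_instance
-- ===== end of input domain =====

-- B replaces A's per-start suffix accumulate + reversed index scan by one pass over
-- prefix sums with a dict of each sum's first occurrence (objective: faster).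

-- ===== PORT A =====
-- itertools.accumulate(xs) (no initial): running sums; ported by hand (exact)
def pvAccumulate (xs : List Int) (s : Int) : List Int :=
  match xs with
  | [] => []
  | x :: t => (s + x) :: pvAccumulate t (s + x)

-- the while loop; fuel = len(results) - pointer, so fuel = 0 ↔ pointer == len(results)
def pvALoop (results : List Int) (fuel pointer : Nat) (maxv : Int) : Int :=
  match fuel with
  | 0 => maxv
  | fuel + 1 =>
    if maxv < (results.length : Int) then
      -- results[pointer:] with pointer ≥ 0 is drop (PySem.List.slice_from_natCast);
      -- [::-1] is reverse (PySem.List.slice?_none_none_neg_one); .index(0) is index?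
      let suffix := results.drop pointer
      let maxv' :=
        match PySem.List.index? (pvAccumulate suffix 0).reverse 0 with
        | some k =>
          let idx : Int := (suffix.length : Int) - (k : Int)
          if idx > maxv then idx else maxv
        | none => maxv        -- except ValueError: pass
      pvALoop results fuel (pointer + 1) maxv'
    else maxv

def get_gap_len (results : List Int) : Int :=
  pvALoop results results.length 0 0

-- ===== PORT B =====
def pvBLoop (xs : List Int) (i : Int) (first : PySem.Dict Int Int) (s best : Int) : Int :=
  match xs with
  | [] => best
  | x :: t =>
    let s' := s + x
    match PySem.Dict.get? first s' with
    | none => pvBLoop t (i + 1) (first.insert s' i) s' best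
    | some j => pvBLoop t (i + 1) first s' (if i - j > best then i - j else best)

def get_gap_len_alt (results : List Int) : Int :=
  pvBLoop results 1 ((PySem.Dict.empty).insert 0 0) 0 0

-- ===== PRECONDITION & SPEC =====
def Spec_get_gap_len (results : List Int) (out : Int) : Prop := out = get_gap_len_alt results
instance (results : List Int) (out : Int) : Decidable (Spec_get_gap_len results out) := by unfold Spec_get_gap_len; infer_instance

-- ===== CLAIM (what is proved, stated in full; the proofs are below) =====
def Claim_equal_get_gap_len : Prop := ∀ (results : List Int), Dom_get_gap_len results → Spec_get_gap_len results (get_gap_len results)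

-- ===== LEMMAS AND PROOFS =====

-- S results q = sum of the first q elements (the q-th prefix sum)
def pvS (results : List Int) (q : Nat) : Int := (results.take q).sum

-- both programs compute the unique r with these three properties
def pvIsRes (results : List Int) (r : Int) : Prop :=
  0 ≤ r ∧
  (r = 0 ∨ ∃ i j : Nat, i < j ∧ j ≤ results.length ∧ pvS results i = pvS results j ∧ r = (j : Int) - (i : Int)) ∧
  (∀ i j : Nat, i < j → j ≤ results.length → pvS results i = pvS results j → (j : Int) - (i : Int) ≤ r)

theorem pvIsRes_unique (results : List Int) (r r' : Int)
    (h : pvIsRes results r) (h' : pvIsRes results r') : r = r' := by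
  obtain ⟨h0, hc, hg⟩ := h
  obtain ⟨h0', hc', hg'⟩ := h'
  apply le_antisymm
  · rcases hc with rfl | ⟨i, j, hij, hjn, hS, rfl⟩
    · exact h0'
    · exact hg' i j hij hjn hS
  · rcases hc' with rfl | ⟨i, j, hij, hjn, hS, rfl⟩
    · exact h0
    · exact hg i j hij hjn hS

theorem pvAccumulate_length (xs : List Int) (s : Int) :
    (pvAccumulate xs s).length = xs.length := by
  induction xs generalizing s with
  | nil => rfl
  | cons x t ih => simp [pvAccumulate, ih]

theorem pvAccumulate_getElem (xs : List Int) (s : Int) (j : Nat) (h : j < xs.length) :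
    (pvAccumulate xs s)[j]'(by rw [pvAccumulate_length]; exact h) = s + (xs.take (j+1)).sum := by
  induction xs generalizing s j with
  | nil => simp at h
  | cons x t ih =>
    cases j with
    | zero => simp [pvAccumulate]
    | succ j =>
      simp only [pvAccumulate, List.getElem_cons_succ, List.take_succ_cons, List.sum_cons]
      rw [ih (s + x) j (by simpa using h)]
      ring

theorem pvS_sum_take_drop (results : List Int) (p m : Nat) :
    ((results.drop p).take m).sum = pvS results (p + m) - pvS results p := by
  unfold pvS
  rw [List.take_add, List.sum_append]
  ring

-- the candidate A computes for a given start position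
def pvCand (results : List Int) (p : Nat) : Int :=
  match PySem.List.index? (pvAccumulate (results.drop p) 0).reverse 0 with
  | some k => ((results.drop p).length : Int) - (k : Int)
  | none => 0

def pvCandFold (results : List Int) (p : Nat) : Nat → Int
  | 0 => 0
  | fuel + 1 => max (pvCand results p) (pvCandFold results (p + 1) fuel)

theorem pvAccRev_length (results : List Int) (p : Nat) :
    (pvAccumulate (results.drop p) 0).reverse.length = (results.drop p).length := by
  rw [List.length_reverse, pvAccumulate_length]

theorem pvCand_le (results : List Int) (p : Nat) :
    pvCand results p ≤ (results.length : Int) := by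
  unfold pvCand
  cases h : PySem.List.index? (pvAccumulate (results.drop p) 0).reverse 0 with
  | none => positivity
  | some k =>
    obtain ⟨hk, -, -⟩ := PySem.List.getElem_of_index?_eq_some h
    rw [pvAccRev_length] at hk
    simp only [List.length_drop] at *
    omega

theorem pvCand_cases (results : List Int) (p : Nat) :
    pvCand results p = 0 ∨ ∃ q : Nat, p < q ∧ q ≤ results.length ∧
      pvS results p = pvS results q ∧ pvCand results p = (q : Int) - (p : Int) := by
  unfold pvCand
  cases h : PySem.List.index? (pvAccumulate (results.drop p) 0).reverse 0 with
  | none => left; rfl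
  | some k =>
    right
    obtain ⟨hk, hv, -⟩ := PySem.List.getElem_of_index?_eq_some h
    have hal : (pvAccumulate (results.drop p) 0).length = (results.drop p).length :=
      pvAccumulate_length ..
    have hdl : (results.drop p).length = results.length - p := List.length_drop ..
    have hkl : k < (pvAccumulate (results.drop p) 0).length := by
      simpa using hk
    rw [List.getElem_reverse] at hv
    rw [pvAccumulate_getElem _ _ ((pvAccumulate (results.drop p) 0).length - 1 - k) (by omega)] at hv
    rw [pvS_sum_take_drop] at hv
    have hpn : p < results.length := by omega
    refine ⟨p + ((pvAccumulate (results.drop p) 0).length - 1 - k + 1), by omega, by omega, by omega, ?_⟩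
    simp only
    push_cast
    omega

theorem pvCand_ge (results : List Int) (p q : Nat) (hpq : p < q) (hqn : q ≤ results.length)
    (hS : pvS results p = pvS results q) : (q : Int) - (p : Int) ≤ pvCand results p := by
  have hal : (pvAccumulate (results.drop p) 0).length = (results.drop p).length :=
    pvAccumulate_length ..
  have hdl : (results.drop p).length = results.length - p := List.length_drop ..
  have hm : q - p - 1 < (results.drop p).length := by omega
  -- the accumulate list has a zero at position q - p - 1
  have hz : (pvAccumulate (results.drop p) 0)[q - p - 1]'(by omega) = 0 := by
    rw [pvAccumulate_getElem _ _ _ hm, pvS_sum_take_drop]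
    have heq : p + (q - p - 1 + 1) = q := by omega
    rw [heq]
    omega
  have hmem : (0 : Int) ∈ (pvAccumulate (results.drop p) 0).reverse := by
    exact List.mem_reverse.mpr (List.mem_iff_getElem.mpr ⟨q - p - 1, by omega, hz⟩)
  have hsome : (PySem.List.index? (pvAccumulate (results.drop p) 0).reverse 0).isSome := by
    rw [PySem.List.index?_isSome_iff]; exact hmem
  obtain ⟨k, hk⟩ := Option.isSome_iff_exists.mp hsome
  obtain ⟨hklt, -, hmin⟩ := PySem.List.getElem_of_index?_eq_some hk
  have hkl : k < (pvAccumulate (results.drop p) 0).length := by simpa using hklt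
  -- k ≤ (acc.length - 1) - (q - p - 1): otherwise the reversed scan passed our zero
  have hkle : k ≤ (pvAccumulate (results.drop p) 0).length - 1 - (q - p - 1) := by
    by_contra hgt
    apply hmin ((pvAccumulate (results.drop p) 0).length - 1 - (q - p - 1)) (by omega)
    rw [List.getElem_reverse]
    have heq : (pvAccumulate (results.drop p) 0).length - 1 -
        ((pvAccumulate (results.drop p) 0).length - 1 - (q - p - 1)) = q - p - 1 := by omega
    simp only [heq]
    exact hz
  unfold pvCand
  rw [hk]
  simp only
  omega

theorem pvCandFold_nonneg (results : List Int) (p fuel : Nat) :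
    0 ≤ pvCandFold results p fuel := by
  induction fuel generalizing p with
  | zero => simp [pvCandFold]
  | succ fuel ih => exact le_trans (ih (p+1)) (le_max_right _ _)

theorem pvCandFold_le (results : List Int) (p fuel : Nat) :
    pvCandFold results p fuel ≤ (results.length : Int) := by
  induction fuel generalizing p with
  | zero => simp [pvCandFold]
  | succ fuel ih => exact max_le (pvCand_le results p) (ih (p+1))

theorem pvCandFold_ge (results : List Int) (p fuel t : Nat) (hp : p ≤ t) (ht : t < p + fuel) :
    pvCand results t ≤ pvCandFold results p fuel := by
  induction fuel generalizing p with
  | zero => omega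
  | succ fuel ih =>
    rcases Nat.eq_or_lt_of_le hp with rfl | hlt
    · exact le_max_left _ _
    · exact le_trans (ih (p+1) hlt (by omega)) (le_max_right _ _)

theorem pvCandFold_cases (results : List Int) (p fuel : Nat) (h : p + fuel ≤ results.length) :
    pvCandFold results p fuel = 0 ∨ ∃ i j : Nat, i < j ∧ j ≤ results.length ∧
      pvS results i = pvS results j ∧ pvCandFold results p fuel = (j : Int) - (i : Int) := by
  induction fuel generalizing p with
  | zero => left; rfl
  | succ fuel ih =>
    have hmax := max_choice (pvCand results p) (pvCandFold results (p+1) fuel)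
    rcases hmax with hm | hm
    · rcases pvCand_cases results p with h0 | ⟨q, hpq, hqn, hS, hc⟩
      · left; rw [pvCandFold, hm, h0]
      · right; exact ⟨p, q, hpq, hqn, hS, by rw [pvCandFold, hm, hc]⟩
    · rcases ih (p+1) (by omega) with h0 | ⟨i, j, hij, hjn, hS, hc⟩
      · left; rw [pvCandFold, hm, h0]
      · right; exact ⟨i, j, hij, hjn, hS, by rw [pvCandFold, hm, hc]⟩

theorem pvALoop_eq (results : List Int) (fuel : Nat) :
    ∀ (p : Nat) (maxv : Int), p + fuel = results.length → 0 ≤ maxv →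
      maxv ≤ (results.length : Int) →
      pvALoop results fuel p maxv = max maxv (pvCandFold results p fuel) := by
  induction fuel with
  | zero =>
    intro p maxv _ h0 _
    simp only [pvALoop, pvCandFold]
    omega
  | succ fuel ih =>
    intro p maxv hpf h0 hle
    rw [pvALoop]
    by_cases hlt : maxv < (results.length : Int)
    · rw [if_pos hlt]
      have hstep : (match PySem.List.index? (pvAccumulate (results.drop p) 0).reverse 0 with
          | some k =>
            let idx : Int := ((results.drop p).length : Int) - (k : Int)
            if idx > maxv then idx else maxv
          | none => maxv) = max maxv (pvCand results p) := by
        unfold pvCand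
        cases h : PySem.List.index? (pvAccumulate (results.drop p) 0).reverse 0 with
        | none => simp only; omega
        | some k =>
          show (if ((results.drop p).length : Int) - (k : Int) > maxv
              then ((results.drop p).length : Int) - (k : Int) else maxv) =
            max maxv (((results.drop p).length : Int) - (k : Int))
          rw [max_def]
          split_ifs <;> omega
      simp only []
      rw [hstep]
      rw [ih (p+1) (max maxv (pvCand results p)) (by omega)
        (le_trans h0 (le_max_left _ _)) (max_le (le_of_lt hlt) (pvCand_le results p))]
      rw [pvCandFold, max_assoc]
    · rw [if_neg hlt]
      have hmx : maxv = (results.length : Int) := le_antisymm hle (by omega)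
      have hcf : pvCandFold results p (fuel+1) ≤ maxv := hmx ▸ pvCandFold_le results p (fuel+1)
      omega

theorem pvIsRes_A (results : List Int) : pvIsRes results (get_gap_len results) := by
  have h := pvALoop_eq results results.length 0 0 (by omega) le_rfl (by positivity)
  rw [max_eq_right (pvCandFold_nonneg results 0 results.length)] at h
  rw [get_gap_len, h]
  refine ⟨pvCandFold_nonneg results 0 results.length,
    pvCandFold_cases results 0 results.length (by omega), ?_⟩
  intro i j hij hjn hS
  exact le_trans (pvCand_ge results i j hij hjn hS)
    (pvCandFold_ge results 0 results.length i (Nat.zero_le i) (by omega))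

theorem pvS_succ (results : List Int) (t : Nat) (h : t < results.length) :
    pvS results (t+1) = pvS results t + results[t] := by
  unfold pvS
  rw [List.take_succ_eq_append_getElem h, List.sum_append]
  simp

-- loop invariant for B: first maps each seen prefix-sum value to its first index,
-- best is the best gap among pairs up to t
theorem pvBLoop_spec (results : List Int) (rest : List Int) :
    ∀ (t : Nat) (first : PySem.Dict Int Int) (best : Int),
      results.drop t = rest → t ≤ results.length →
      (∀ v j, first.get? v = some j → ∃ u : Nat, j = (u : Int) ∧ u ≤ t ∧ pvS results u = v ∧
        ∀ w : Nat, w < u → pvS results w ≠ v) →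
      (∀ v, first.get? v = none → ∀ u : Nat, u ≤ t → pvS results u ≠ v) →
      0 ≤ best →
      (best = 0 ∨ ∃ i j : Nat, i < j ∧ j ≤ t ∧ pvS results i = pvS results j ∧
        best = (j : Int) - (i : Int)) →
      (∀ i j : Nat, i < j → j ≤ t → pvS results i = pvS results j → (j : Int) - (i : Int) ≤ best) →
      pvIsRes results (pvBLoop rest ((t : Int) + 1) first (pvS results t) best) := by
  induction rest with
  | nil =>
    intro t first best hdrop htn _ _ h0 hc hg
    have ht : results.length ≤ t := List.drop_eq_nil_iff.mp hdrop
    have heq : t = results.length := le_antisymm htn ht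
    subst heq
    exact ⟨h0, hc, hg⟩
  | cons x rest ih =>
    intro t first best hdrop htn hsome hnone h0 hc hg
    have ht : t < results.length := by
      by_contra hge
      rw [List.drop_eq_nil_iff.mpr (by omega)] at hdrop
      cases hdrop
    have hcons : results[t] :: results.drop (t+1) = results.drop t := List.getElem_cons_drop ht
    rw [← hcons] at hdrop
    injection hdrop with hx hrest
    have hs' : pvS results t + x = pvS results (t+1) := by rw [pvS_succ results t ht, hx]
    rw [pvBLoop]
    simp only [hs']
    have hcast : (t : Int) + 1 + 1 = ((t + 1 : Nat) : Int) + 1 := by push_cast; ring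
    cases hgd : first.get? (pvS results (t+1)) with
    | none =>
      simp only [hcast]
      apply ih (t+1) _ best hrest (by omega)
      · intro v j hj
        rw [PySem.Dict.get?_insert] at hj
        split_ifs at hj with hv
        · refine ⟨t+1, by injection hj with h; omega, le_rfl, hv ▸ rfl, ?_⟩
          intro w hw
          exact hnone v (hv ▸ hgd) w (by omega)
        · obtain ⟨u, hju, hut, hSu, hmin⟩ := hsome v j hj
          exact ⟨u, hju, by omega, hSu, hmin⟩
      · intro v hv u hu
        rw [PySem.Dict.get?_insert] at hv
        split_ifs at hv with h1
        rcases Nat.eq_or_lt_of_le hu with heq | hlt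
        · intro hS
          exact h1 (by rw [← hS, heq])
        · exact hnone v hv u (by omega)
      · exact h0
      · rcases hc with rfl | ⟨i, j, hij, hjt, hS, hb⟩
        · exact Or.inl rfl
        · exact Or.inr ⟨i, j, hij, by omega, hS, hb⟩
      · intro i j hij hjn hS
        rcases Nat.eq_or_lt_of_le hjn with heq | hlt
        · exfalso
          exact hnone (pvS results (t+1)) hgd i (by omega) (heq ▸ hS)
        · exact hg i j hij (by omega) hS
    | some j =>
      simp only [hcast]
      obtain ⟨u, rfl, hut, hSu, hmin⟩ := hsome _ _ hgd
      apply ih (t+1) first _ hrest (by omega)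
      · intro v j' hj'
        obtain ⟨u', hju', hut', hSu', hmin'⟩ := hsome v j' hj'
        exact ⟨u', hju', by omega, hSu', hmin'⟩
      · intro v hv u' hu'
        rcases Nat.eq_or_lt_of_le hu' with heq | hlt
        · intro hS
          rw [← heq, hS] at hgd
          rw [hv] at hgd
          simp at hgd
        · exact hnone v hv u' (by omega)
      · split_ifs <;> omega
      · split_ifs with hb
        · refine Or.inr ⟨u, t+1, by omega, le_rfl, hSu, by push_cast; ring⟩
        · rcases hc with rfl | ⟨i, j', hij, hjt, hS, hbv⟩
          · exact Or.inl rfl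
          · exact Or.inr ⟨i, j', hij, by omega, hS, hbv⟩
      · intro i j' hij hjn hS
        rcases Nat.eq_or_lt_of_le hjn with heq | hlt
        · have hui : u ≤ i := by
            by_contra hiu
            exact hmin i (by omega) (heq ▸ hS)
          have : (j' : Int) = (t : Int) + 1 := by rw [heq]; push_cast; ring
          rw [this]
          split_ifs <;> omega
        · have := hg i j' hij (by omega) hS
          split_ifs <;> omega

theorem pvIsRes_B (results : List Int) : pvIsRes results (get_gap_len_alt results) := by
  have h := pvBLoop_spec results results 0 ((PySem.Dict.empty).insert 0 0) 0
    (by simp) (Nat.zero_le _)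
    (by
      intro v j hj
      rw [PySem.Dict.get?_insert] at hj
      split_ifs at hj with hv
      · refine ⟨0, by injection hj with h; omega, le_rfl, by simp [pvS, hv], ?_⟩
        intro w hw
        omega
      · rw [PySem.Dict.get?_empty] at hj
        cases hj)
    (by
      intro v hv u hu
      rw [PySem.Dict.get?_insert] at hv
      split_ifs at hv with h1
      have hu0 : u = 0 := by omega
      rw [hu0]
      simp [pvS]
      intro hS
      exact h1 hS.symm)
    le_rfl (Or.inl rfl)
    (by intro i j hij hjn _; omega)
  simpa [get_gap_len_alt, pvS] using h

-- ===== VERDICT (by name: the statement is the Claim_ definition above) =====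
theorem get_gap_len_spec : Claim_equal_get_gap_len := by
  intro results _
  unfold Spec_get_gap_len
  exact pvIsRes_unique results _ _ (pvIsRes_A results) (pvIsRes_B results)
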